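-- pv_equiv track=rewrite | github.com/WeStillDontKnowTheAlgorithmWeSawThatDay/AlgorithmStudyOfDestruction | 3주차/신고_결과_받기_베베.py | solution
-- ===== SOURCE A (Python) =====
-- def solution(id_list: list, report: list, k: int):
--     unique_report = list(set(report))
--
--     # 유저별 신고한 아이디
--     reporting_user_list = {}
--
--     # 유져별 신고 당한 횟수
--     reported_user_list = {}
--
--     for id in id_list:
--         reporting_user_list[id] = []
--
--     for id in id_list:
--         reported_user_list[id] = 0
--
--     for user_report_info in unique_report:
--         infos = user_report_info.split()
--         reporting_user = infos[0]
--         reported_user = infos[1]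
--
--         reporting_user_list[reporting_user].append(reported_user)
--         reported_user_list[reported_user] += 1
--
--     answer = []
--     for i in id_list:
--         result = 0
--         for u in reporting_user_list[i]:
--             if reported_user_list[u] >= k:
--                 result += 1
--         answer.append(result)
--     return answer
-- ===== SOURCE B (Python) =====
-- def solution(id_list: list, report: list, k: int):
--     # Push-style: count reports per target once, then push +1 to each reporter
--     # of a banned target while scanning the distinct reports a single time.
--     uniq = set(report)
--
--     cnt = {}  # times each user was reported (distinct report strings)
--     for r in uniq:
--         t = r.split()[1]
--         cnt[t] = cnt.get(t, 0) + 1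
--
--     ans = {i: 0 for i in id_list}
--     for r in uniq:
--         p = r.split()
--         if cnt.get(p[1], 0) >= k:
--             ans[p[0]] += 1
--
--     return [ans[i] for i in id_list]
-- ===== Notes on version B (the rewrite author's own statement) =====
-- stated objective: simpler
-- what changed: Replaces A's per-user adjacency-list dict and nested pull loop (for each id, scan its reported list against a count dict) with a single push pass: build one count dict over the distinct reports, then increment a per-reporter answer map once per distinct report whose target reached k, and read the map out in id_list order.
import Mathlib
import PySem

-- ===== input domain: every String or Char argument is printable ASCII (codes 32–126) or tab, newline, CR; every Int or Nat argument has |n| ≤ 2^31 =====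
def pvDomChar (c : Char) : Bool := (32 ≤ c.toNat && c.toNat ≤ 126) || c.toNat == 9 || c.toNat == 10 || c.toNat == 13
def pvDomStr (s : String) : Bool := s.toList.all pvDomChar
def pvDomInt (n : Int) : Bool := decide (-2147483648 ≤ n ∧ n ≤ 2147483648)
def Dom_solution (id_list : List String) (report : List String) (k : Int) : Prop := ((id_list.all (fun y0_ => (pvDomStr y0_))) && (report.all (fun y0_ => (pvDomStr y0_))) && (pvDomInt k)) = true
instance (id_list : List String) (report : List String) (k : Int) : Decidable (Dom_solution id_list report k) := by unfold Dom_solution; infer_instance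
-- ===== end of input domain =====

set_option maxRecDepth 4096

-- B replaces A's per-user adjacency lists + nested pull loop by a single push pass over the
-- distinct reports with one count dict and one answer dict (objective: simpler decomposition).

-- ===== PORT A =====
def solution (id_list : List String) (report : List String) (k : Int) : List Int :=
  let unique_report : List String := PySem.Set.ofList report
  let reporting0 : PySem.Dict String (List String) :=
    id_list.foldl (fun d id => d.insert id []) PySem.Dict.empty
  let reported0 : PySem.Dict String Int :=
    id_list.foldl (fun d id => d.insert id 0) PySem.Dict.empty
  -- d[x].append(y) / d[x] += 1 raise KeyError on a missing key; Pre_ keeps every key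
  -- present, where Dict.modify with the unused default computes exactly the Python.
  let st :=
    unique_report.foldl
      (fun (st : PySem.Dict String (List String) × PySem.Dict String Int) info =>
        (st.1.modify (PySem.List.pyGetD (PySem.Str.split₀ info) 0 "") []
            (· ++ [PySem.List.pyGetD (PySem.Str.split₀ info) 1 ""]),
         st.2.modify (PySem.List.pyGetD (PySem.Str.split₀ info) 1 "") 0 (· + 1)))
      (reporting0, reported0)
  id_list.foldl
    (fun answer i =>
      answer ++ [(st.1.getD i []).foldl
        (fun result u => if st.2.getD u 0 ≥ k then result + 1 else result) (0 : Int)])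
    []

-- ===== PORT B =====
def solution_alt (id_list : List String) (report : List String) (k : Int) : List Int :=
  let uniq : List String := PySem.Set.ofList report
  let cnt : PySem.Dict String Int :=
    uniq.foldl
      (fun d r => d.insert (PySem.List.pyGetD (PySem.Str.split₀ r) 1 "")
        (d.getD (PySem.List.pyGetD (PySem.Str.split₀ r) 1 "") 0 + 1))
      PySem.Dict.empty
  let ans0 : PySem.Dict String Int :=
    id_list.foldl (fun d i => d.insert i 0) PySem.Dict.empty
  -- ans[p[0]] += 1 raises KeyError on a missing key; Pre_ keeps p[0] ∈ id_list, where
  -- insert (getD + 1) computes exactly the Python.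
  let ans : PySem.Dict String Int :=
    uniq.foldl
      (fun d r =>
        if cnt.getD (PySem.List.pyGetD (PySem.Str.split₀ r) 1 "") 0 ≥ k then
          d.insert (PySem.List.pyGetD (PySem.Str.split₀ r) 0 "")
            (d.getD (PySem.List.pyGetD (PySem.Str.split₀ r) 0 "") 0 + 1)
        else d)
      ans0
  id_list.map (fun i => ans.getD i 0)

-- ===== PRECONDITION & SPEC =====
-- Pre_ excludes exactly the inputs where Python A raises: a report entry with fewer than
-- two whitespace-separated tokens (IndexError) or whose reporter/reported id is not in
-- id_list (KeyError).
def Pre_solution (id_list : List String) (report : List String) (k : Int) : Prop :=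
  ∀ r ∈ report, 2 ≤ (PySem.Str.split₀ r).length ∧
    (PySem.Str.split₀ r).getD 0 "" ∈ id_list ∧ (PySem.Str.split₀ r).getD 1 "" ∈ id_list
instance (id_list : List String) (report : List String) (k : Int) : Decidable (Pre_solution id_list report k) := by unfold Pre_solution; infer_instance

def pvWitness_solution : List String × List String × Int := (["muzi", "frodo"], ["muzi frodo", "frodo muzi"], 1)

def Spec_solution (id_list : List String) (report : List String) (k : Int) (out : List Int) : Prop := out = solution_alt id_list report k
instance (id_list : List String) (report : List String) (k : Int) (out : List Int) : Decidable (Spec_solution id_list report k out) := by unfold Spec_solution; infer_instance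

-- ===== CLAIM (what is proved, stated in full; the proofs are below) =====
def Claim_equal_solution : Prop := ∀ (id_list : List String) (report : List String) (k : Int), Dom_solution id_list report k → Pre_solution id_list report k → Spec_solution id_list report k (solution id_list report k)

-- ===== LEMMAS AND PROOFS =====

-- first token / second token of a report line
def pvTok0 (r : String) : String := PySem.List.pyGetD (PySem.Str.split₀ r) 0 ""
def pvTok1 (r : String) : String := PySem.List.pyGetD (PySem.Str.split₀ r) 1 ""

-- a fold inserting the constant 0 never changes any getD-with-default-0 value
theorem pv_getD_insert_zero (l : List String) (v : String) :
    ∀ d : PySem.Dict String Int, d.getD v 0 = 0 →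
      (l.foldl (fun d i => d.insert i 0) d).getD v 0 = 0 := by
  induction l with
  | nil => intro d h; simpa using h
  | cons x xs ih =>
    intro d h
    simp only [List.foldl_cons]
    exact ih _ (by rw [PySem.Dict.getD_insert]; split <;> simp [h])

-- same, inserting the empty list
theorem pv_getD_insert_nil (l : List String) (v : String) :
    ∀ d : PySem.Dict String (List String), d.getD v [] = [] →
      (l.foldl (fun d i => d.insert i ([] : List String)) d).getD v [] = [] := by
  induction l with
  | nil => intro d h; simpa using h
  | cons x xs ih =>
    intro d h
    simp only [List.foldl_cons]
    exact ih _ (by rw [PySem.Dict.getD_insert]; split <;> simp [h])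

-- B's guarded increment loop counts, per id, the admissible report lines
theorem pv_getD_ans (cnt : PySem.Dict String Int) (k : Int) (i : String) (L : List String) :
    ∀ d : PySem.Dict String Int,
      (L.foldl
        (fun d r =>
          if cnt.getD (PySem.List.pyGetD (PySem.Str.split₀ r) 1 "") 0 ≥ k then
            d.insert (PySem.List.pyGetD (PySem.Str.split₀ r) 0 "")
              (d.getD (PySem.List.pyGetD (PySem.Str.split₀ r) 0 "") 0 + 1)
          else d) d).getD i 0
      = d.getD i 0 +
        (L.countP (fun r => decide (cnt.getD (pvTok1 r) 0 ≥ k) && (pvTok0 r == i)) : Int) := by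
  induction L with
  | nil => intro d; simp
  | cons r L ih =>
    intro d
    simp only [List.foldl_cons, List.countP_cons]
    by_cases hc : cnt.getD (PySem.List.pyGetD (PySem.Str.split₀ r) 1 "") 0 ≥ k
    · rw [if_pos hc, ih, PySem.Dict.getD_insert]
      by_cases hi : i = PySem.List.pyGetD (PySem.Str.split₀ r) 0 ""
      · simp only [pvTok0, pvTok1, hi, hc, decide_true, Bool.true_and,
          beq_self_eq_true, if_true]
        push_cast
        ring
      · have hb : (PySem.List.pyGetD (PySem.Str.split₀ r) 0 "" == i) = false :=
          beq_eq_false_iff_ne.mpr (Ne.symm hi)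
        rw [if_neg hi]
        simp [pvTok0, pvTok1, hb]
    · rw [if_neg hc, ih]
      simp [pvTok0, pvTok1, hc]

-- the common value of both reported-count dictionaries
theorem pv_cnt_eq (L : List String) (v : String)
    (d : PySem.Dict String Int) (hd : d.getD v 0 = 0) :
    (L.foldl (fun d r => d.modify (PySem.List.pyGetD (PySem.Str.split₀ r) 1 "") 0 (· + 1)) d).getD v 0
      = ((L.map pvTok1).count v : Int) := by
  have h := PySem.Dict.getD_foldl_modify_add_one (l := L.map pvTok1) (d := d) (v := v)
  rw [List.foldl_map] at h
  simpa [pvTok1, hd] using h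

theorem pv_cntB_eq (L : List String) (v : String) :
    (L.foldl
      (fun d r => d.insert (PySem.List.pyGetD (PySem.Str.split₀ r) 1 "")
        (d.getD (PySem.List.pyGetD (PySem.Str.split₀ r) 1 "") 0 + 1))
      PySem.Dict.empty).getD v 0 = ((L.map pvTok1).count v : Int) := by
  have h := PySem.Dict.getD_foldl_insert_add_one (l := L.map pvTok1)
    (d := (PySem.Dict.empty : PySem.Dict String Int)) (v := v)
  rw [List.foldl_map] at h
  simpa [pvTok1] using h

-- A's adjacency dict lists, per id, the reported users of its distinct reports
theorem pv_reporting_eq (L : List String) (i : String)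
    (d : PySem.Dict String (List String)) (hd : d.getD i [] = []) :
    (L.foldl
      (fun d r => d.modify (PySem.List.pyGetD (PySem.Str.split₀ r) 0 "") []
        (· ++ [PySem.List.pyGetD (PySem.Str.split₀ r) 1 ""])) d).getD i []
      = ((L.map (fun r => (pvTok0 r, pvTok1 r))).filter (fun p => p.1 == i)).map (·.2) := by
  have h := PySem.Dict.getD_foldl_modify_append (l := L.map (fun r => (pvTok0 r, pvTok1 r)))
    (d := d) (c := i)
  rw [List.foldl_map] at h
  simpa [pvTok0, pvTok1, hd] using h

-- ===== VERDICT (by name: the statement is the Claim_ definition above) =====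
theorem solution_spec : Claim_equal_solution := by
  intro id_list report k _ _
  unfold Spec_solution solution solution_alt
  simp only []
  rw [PySem.List.foldl_prod_mk
    (f := fun (d : PySem.Dict String (List String)) info =>
      d.modify (PySem.List.pyGetD (PySem.Str.split₀ info) 0 "") []
        (· ++ [PySem.List.pyGetD (PySem.Str.split₀ info) 1 ""]))
    (g := fun (d : PySem.Dict String Int) info =>
      d.modify (PySem.List.pyGetD (PySem.Str.split₀ info) 1 "") 0 (· + 1))]
  rw [PySem.List.foldl_append_singleton_eq_map]
  rw [List.nil_append]
  apply List.map_congr_left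
  intro i _
  rw [PySem.List.foldl_ite_add_one]
  rw [pv_reporting_eq _ _ _ (pv_getD_insert_nil id_list i PySem.Dict.empty (by simp))]
  rw [pv_getD_ans]
  rw [pv_getD_insert_zero id_list i PySem.Dict.empty (by simp)]
  rw [List.countP_map, List.countP_filter, List.countP_map]
  simp only [zero_add, Nat.cast_inj]
  apply List.countP_congr
  intro r _
  simp only [Function.comp]
  rw [pv_cnt_eq _ _ _ (pv_getD_insert_zero id_list _ PySem.Dict.empty (by simp)),
    pv_cntB_eq]
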